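-- pv_equiv track=rewrite | github.com/MusabAhmed53/FYP-Server | backup/Version 1/Untitled5.py | group_boxes_by_line
-- ===== SOURCE A (Python) =====
-- def group_boxes_by_line(boxes, text_threshold):
--     lines = []
--     sorted_boxes = sorted(boxes, key=lambda x: (x[1], x[0]))
--     current_line = [sorted_boxes[0]]
--     for box in sorted_boxes[1:]:
--         if box[1] - current_line[-1][1] < text_threshold:
--             current_line.append(box)
--         else:
--             lines.append(current_line)
--             current_line = [box]
--     lines.append(current_line)
--     return lines
-- ===== SOURCE B (Python) =====
-- def group_boxes_by_line(boxes, text_threshold):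
--     # Staged passes: sort, find the break indices (i where the y-gap to the
--     # previous sorted box reaches the threshold), then slice the sorted list
--     # between consecutive boundaries.
--     s = sorted(boxes, key=lambda x: (x[1], x[0]))
--     breaks = [i for i in range(1, len(s))
--               if s[i][1] - s[i - 1][1] >= text_threshold]
--     bounds = [0] + breaks + [len(s)]
--     return [s[bounds[j]:bounds[j + 1]] for j in range(len(bounds) - 1)]
-- ===== Notes on version B (the rewrite author's own statement) =====
-- stated objective: alternative
-- what changed: B replaces A's single forward loop with a current_line accumulator by three staged passes: sort, collect the break indices where the y-gap reaches the threshold, then build the lines by slicing the sorted list between consecutive boundaries; on the empty list A raises IndexError (excluded by Pre_).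
import Mathlib
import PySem

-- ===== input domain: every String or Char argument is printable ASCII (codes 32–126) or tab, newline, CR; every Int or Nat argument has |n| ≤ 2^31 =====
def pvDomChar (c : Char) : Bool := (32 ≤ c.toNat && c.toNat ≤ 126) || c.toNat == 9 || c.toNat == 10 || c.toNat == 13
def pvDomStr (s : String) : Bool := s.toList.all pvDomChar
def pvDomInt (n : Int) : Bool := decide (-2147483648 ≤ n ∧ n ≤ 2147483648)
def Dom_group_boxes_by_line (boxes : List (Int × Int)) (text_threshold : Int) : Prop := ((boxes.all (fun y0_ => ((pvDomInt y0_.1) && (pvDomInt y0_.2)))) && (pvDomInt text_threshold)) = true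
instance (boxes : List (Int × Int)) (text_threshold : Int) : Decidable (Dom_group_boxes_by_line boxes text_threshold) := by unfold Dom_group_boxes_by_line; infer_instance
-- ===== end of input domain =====

-- B replaces A's forward loop with a current_line accumulator by staged passes:
-- sort, collect break indices, slice between consecutive boundaries; same value
-- on every input A accepts (Pre_: nonempty list, A raises IndexError on []).

-- ===== PORT A =====
def group_boxes_by_line (boxes : List (Int × Int)) (text_threshold : Int) : List (List (Int × Int)) :=
  match PySem.List.pyGet? (PySem.List.sorted2 boxes (fun x => x.2) (fun x => x.1)) 0 with
  | none => []   -- Python raises IndexError here; excluded by Pre_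
  | some b0 =>
    -- lines = [], current_line = [b0]; the loop state is the pair (lines, current_line)
    (((PySem.List.slice (PySem.List.sorted2 boxes (fun x => x.2) (fun x => x.1)) (some 1) none).foldl
      (fun (st : List (List (Int × Int)) × List (Int × Int)) box =>
        if box.2 - ((PySem.List.pyGet? st.2 (-1)).getD (0, 0)).2 < text_threshold
        then (st.1, st.2 ++ [box])
        else (st.1 ++ [st.2], [box])) (([] : List (List (Int × Int))), [b0])).1
     ++ [((PySem.List.slice (PySem.List.sorted2 boxes (fun x => x.2) (fun x => x.1)) (some 1) none).foldl
      (fun (st : List (List (Int × Int)) × List (Int × Int)) box =>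
        if box.2 - ((PySem.List.pyGet? st.2 (-1)).getD (0, 0)).2 < text_threshold
        then (st.1, st.2 ++ [box])
        else (st.1 ++ [st.2], [box])) (([] : List (List (Int × Int))), [b0])).2])

-- ===== PORT B =====
def group_boxes_by_line_alt (boxes : List (Int × Int)) (text_threshold : Int) : List (List (Int × Int)) :=
  let s := PySem.List.sorted2 boxes (fun x => x.2) (fun x => x.1)
  let breaks := (PySem.List.pyRange 1 (s.length : Int) 1).filter
      (fun i => decide (text_threshold ≤ (PySem.List.pyGetD s i (0, 0)).2 - (PySem.List.pyGetD s (i - 1) (0, 0)).2))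
  let bounds := (0 : Int) :: (breaks ++ [(s.length : Int)])
  (PySem.List.pyRange 0 ((bounds.length : Int) - 1) 1).map
      (fun j => PySem.List.slice s (some (PySem.List.pyGetD bounds j 0)) (some (PySem.List.pyGetD bounds (j + 1) 0)))

-- ===== PRECONDITION & SPEC =====
-- Pre_ excludes only the empty list, on which Python A raises IndexError.
def Pre_group_boxes_by_line (boxes : List (Int × Int)) (text_threshold : Int) : Prop := boxes ≠ []
instance (boxes : List (Int × Int)) (text_threshold : Int) : Decidable (Pre_group_boxes_by_line boxes text_threshold) := by unfold Pre_group_boxes_by_line; infer_instance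
def pvWitness_group_boxes_by_line : (List (Int × Int)) × Int := ([(0, 0), (1, 5)], 3)

def Spec_group_boxes_by_line (boxes : List (Int × Int)) (text_threshold : Int) (out : List (List (Int × Int))) : Prop := out = group_boxes_by_line_alt boxes text_threshold
instance (boxes : List (Int × Int)) (text_threshold : Int) (out : List (List (Int × Int))) : Decidable (Spec_group_boxes_by_line boxes text_threshold out) := by unfold Spec_group_boxes_by_line; infer_instance

-- ===== CLAIM (what is proved, stated in full; the proofs are below) =====
def Claim_equal_group_boxes_by_line : Prop := ∀ (boxes : List (Int × Int)) (text_threshold : Int), Dom_group_boxes_by_line boxes text_threshold → Pre_group_boxes_by_line boxes text_threshold → Spec_group_boxes_by_line boxes text_threshold (group_boxes_by_line boxes text_threshold)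

-- ===== LEMMAS AND PROOFS =====

-- canonical recursive grouping of a (sorted) nonempty list, used only in the proofs
def grp (tt : Int) : (Int × Int) → List (Int × Int) → List (List (Int × Int))
  | b, [] => [[b]]
  | b, c :: rest =>
    match grp tt c rest with
    | [] => [[b]]
    | g :: gs => if c.2 - b.2 < tt then (b :: g) :: gs else [b] :: g :: gs

lemma grp_shape (tt : Int) (b : Int × Int) (t : List (Int × Int)) :
    ∃ g gs, grp tt b t = (b :: g) :: gs := by
  cases t with
  | nil => exact ⟨[], [], rfl⟩
  | cons c rest =>
    obtain ⟨g, gs, h⟩ := grp_shape tt c rest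
    by_cases hc : c.2 - b.2 < tt
    · exact ⟨c :: g, gs, by simp [grp, h, hc]⟩
    · exact ⟨[], (c :: g) :: gs, by simp [grp, h, hc]⟩

lemma grp_flatten (tt : Int) (t : List (Int × Int)) :
    ∀ b : Int × Int, (grp tt b t).flatten = b :: t := by
  induction t with
  | nil => intro b; simp [grp]
  | cons c rest ih =>
    intro b
    obtain ⟨g, gs, hg⟩ := grp_shape tt c rest
    have hf := ih c
    rw [hg] at hf
    by_cases hc : c.2 - b.2 < tt
    · simp only [grp, hg, if_pos hc]
      simpa using hf
    · simp only [grp, hg, if_neg hc]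
      simpa using hf

def mapHead (f : List (Int × Int) → List (Int × Int)) : List (List (Int × Int)) → List (List (Int × Int))
  | [] => []
  | g :: gs => f g :: gs

-- A's loop, started with any current line of the form cur ++ [b], finishes the grouping of b :: t
lemma foldA_eq_grp (tt : Int) (t : List (Int × Int)) :
    ∀ (lines : List (List (Int × Int))) (cur : List (Int × Int)) (b : Int × Int),
    ((t.foldl
        (fun (st : List (List (Int × Int)) × List (Int × Int)) box =>
          if box.2 - ((PySem.List.pyGet? st.2 (-1)).getD (0, 0)).2 < tt
          then (st.1, st.2 ++ [box])
          else (st.1 ++ [st.2], [box])) (lines, cur ++ [b])).1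
     ++ [(t.foldl
        (fun (st : List (List (Int × Int)) × List (Int × Int)) box =>
          if box.2 - ((PySem.List.pyGet? st.2 (-1)).getD (0, 0)).2 < tt
          then (st.1, st.2 ++ [box])
          else (st.1 ++ [st.2], [box])) (lines, cur ++ [b])).2])
    = lines ++ mapHead (cur ++ ·) (grp tt b t) := by
  induction t with
  | nil => intro lines cur b; simp [grp, mapHead]
  | cons c rest ih =>
    intro lines cur b
    obtain ⟨g, gs, hg⟩ := grp_shape tt c rest
    simp only [List.foldl_cons, PySem.List.pyGet?_neg_one_append_singleton, Option.getD_some]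
    by_cases hc : c.2 - b.2 < tt
    · have hgb : grp tt b (c :: rest) = (b :: c :: g) :: gs := by simp [grp, hg, hc]
      have := ih lines (cur ++ [b]) c
      simp only [hc, if_pos, List.append_assoc] at this ⊢
      rw [this, hgb]
      simp [mapHead, hg]
    · have hgb : grp tt b (c :: rest) = [b] :: (c :: g) :: gs := by simp [grp, hg, hc]
      have := ih (lines ++ [cur ++ [b]]) [] c
      simp only [List.nil_append] at this
      rw [if_neg hc, this, hgb]
      simp [mapHead, hg]

lemma mapHead_id (l : List (List (Int × Int))) : mapHead (fun x => x) l = l := by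
  cases l <;> simp [mapHead]

-- break positions: indices (counted from `i`) of boxes whose gap to the previous box reaches tt
def brkAux (tt : Int) : Nat → (Int × Int) → List (Int × Int) → List Nat
  | _, _, [] => []
  | i, a, c :: rest => (if tt ≤ c.2 - a.2 then [i] else []) ++ brkAux tt (i + 1) c rest

-- cumulative end positions of the groups, starting at offset j
def endsN : Nat → List (List (Int × Int)) → List Nat
  | _, [] => []
  | j, g :: gs => (j + g.length) :: endsN (j + g.length) gs

-- consecutive (start, end) index pairs of the groups
def cutPairsN : Nat → List (List (Int × Int)) → List (Nat × Nat)
  | _, [] => []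
  | j, g :: gs => (j, j + g.length) :: cutPairsN (j + g.length) gs

lemma zip_ends_eq_cutPairs : ∀ (P : List (List (Int × Int))) (j : Nat),
    (j :: endsN j P).zip (endsN j P) = cutPairsN j P := by
  intro P
  induction P with
  | nil => intro j; simp [endsN, cutPairsN]
  | cons g gs ih =>
    intro j
    simp [endsN, cutPairsN, ih (j + g.length)]

lemma chop_cutPairs : ∀ (P : List (List (Int × Int))) (pre : List (Int × Int)),
    (cutPairsN pre.length P).map
      (fun p => PySem.List.slice (pre ++ P.flatten) (some (p.1 : Int)) (some (p.2 : Int))) = P := by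
  intro P
  induction P with
  | nil => intro pre; simp [cutPairsN]
  | cons g gs ih =>
    intro pre
    simp only [cutPairsN, List.map_cons, List.flatten_cons]
    refine List.cons_eq_cons.mpr ⟨?_, ?_⟩
    · have h1 : ((pre.length + g.length : Nat) : Int) = (pre.length : Int) + (g.length : Int) := by
        push_cast; ring
      rw [h1, PySem.List.slice_natCast_add, List.drop_left, List.take_left]
    · have h2 := ih (pre ++ g)
      simpa [List.append_assoc] using h2

-- range-with-indexing form of a pass over consecutive pairs equals the zip form
lemma mapRange_pairs {β : Type} (bs : List Int) (g : Int → Int → β) :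
    (PySem.List.pyRange 0 ((bs.length : Int) - 1) 1).map
      (fun j => g (PySem.List.pyGetD bs j 0) (PySem.List.pyGetD bs (j + 1) 0))
    = (bs.zip bs.tail).map (fun p => g p.1 p.2) := by
  apply List.ext_getElem
  · simp [PySem.List.length_pyRange_one]
  · intro k h1 h2
    have hk : k + 1 < bs.length := by
      simp [PySem.List.length_pyRange_one] at h1
      omega
    simp only [List.getElem_map, PySem.List.getElem_pyRange_one, List.getElem_zip,
      List.getElem_tail, zero_add]
    have c2 : ((k : Nat) : Int) + 1 = ((k + 1 : Nat) : Int) := by push_cast; ring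
    rw [c2, PySem.List.pyGetD_natCast, PySem.List.pyGetD_natCast,
      List.getD_eq_getElem _ _ (by omega : k < bs.length),
      List.getD_eq_getElem _ _ hk]

-- the comprehension's filtered range computes brkAux
lemma filter_range_eq_brkAux (tt : Int) : ∀ (t : List (Int × Int)) (pre : List (Int × Int)) (b : Int × Int),
    (PySem.List.pyRange ((pre.length : Int) + 1) (((pre ++ b :: t).length : Int)) 1).filter
      (fun i => decide (tt ≤ (PySem.List.pyGetD (pre ++ b :: t) i (0, 0)).2 - (PySem.List.pyGetD (pre ++ b :: t) (i - 1) (0, 0)).2))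
    = (brkAux tt (pre.length + 1) b t).map (fun k : Nat => (k : Int)) := by
  intro t pre b
  induction t generalizing pre b with
  | nil =>
    have hle : (((pre ++ [b]).length : Nat) : Int) ≤ (pre.length : Int) + 1 := by simp
    rw [PySem.List.pyRange_one_eq_nil hle]
    simp [brkAux]
  | cons c rest ih =>
    have hlt : (pre.length : Int) + 1 < (((pre ++ b :: c :: rest).length : Nat) : Int) := by
      simp
    rw [PySem.List.pyRange_one_cons hlt, List.filter_cons]
    have e1 : PySem.List.pyGetD (pre ++ b :: c :: rest) ((pre.length : Int) + 1) (0, 0) = c := by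
      have hc1 : ((pre.length : Int) + 1) = ((pre.length + 1 : Nat) : Int) := by push_cast; ring
      rw [hc1, PySem.List.pyGetD_natCast, List.getD_eq_getElem _ _ (by simp),
        List.getElem_append_right (by omega)]
      simp
    have e0 : PySem.List.pyGetD (pre ++ b :: c :: rest) ((pre.length : Int) + 1 - 1) (0, 0) = b := by
      have hc0 : ((pre.length : Int) + 1 - 1) = ((pre.length : Nat) : Int) := by ring
      rw [hc0, PySem.List.pyGetD_natCast, List.getD_eq_getElem _ _ (by simp),
        List.getElem_append_right (le_refl _)]
      simp
    have htail : List.filter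
        (fun i => decide (tt ≤ (PySem.List.pyGetD (pre ++ b :: c :: rest) i (0, 0)).2 - (PySem.List.pyGetD (pre ++ b :: c :: rest) (i - 1) (0, 0)).2))
        (PySem.List.pyRange ((pre.length : Int) + 1 + 1) (((pre ++ b :: c :: rest).length : Nat) : Int) 1)
        = (brkAux tt (pre.length + 1 + 1) c rest).map (fun k : Nat => (k : Int)) := by
      have h := ih (pre ++ [b]) c
      simp only [List.append_assoc, List.cons_append, List.nil_append, List.length_append,
        List.length_cons, List.length_nil] at h ⊢
      push_cast at h
      convert h using 3
    rw [e1, e0, htail]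
    by_cases hc : tt ≤ c.2 - b.2
    · rw [if_pos (by simpa using hc)]
      have hb : brkAux tt (pre.length + 1) b (c :: rest)
          = (pre.length + 1) :: brkAux tt (pre.length + 1 + 1) c rest := by
        simp [brkAux, hc]
      rw [hb, List.map_cons]
      refine List.cons_eq_cons.mpr ⟨by push_cast; ring, rfl⟩
    · rw [if_neg (by simpa using hc)]
      have hb : brkAux tt (pre.length + 1) b (c :: rest)
          = brkAux tt (pre.length + 1 + 1) c rest := by
        simp [brkAux, hc]
      rw [hb]

-- the break positions followed by the total length are the group end positions of grp
lemma brkAux_ends (tt : Int) : ∀ (t : List (Int × Int)) (b : Int × Int) (j : Nat),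
    brkAux tt (j + 1) b t ++ [j + 1 + t.length] = endsN j (grp tt b t) := by
  intro t
  induction t with
  | nil => intro b j; simp [brkAux, grp, endsN]
  | cons c rest ih =>
    intro b j
    obtain ⟨g, gs, hg⟩ := grp_shape tt c rest
    have hi := ih c (j + 1)
    rw [hg] at hi
    by_cases hc : c.2 - b.2 < tt
    · have hnot : ¬ tt ≤ c.2 - b.2 := by omega
      simp only [grp, hg, if_pos hc, brkAux, hnot, endsN,
        List.length_cons] at hi ⊢
      have e2 : j + 1 + 1 + rest.length = j + 1 + (rest.length + 1) := by omega
      have e1 : j + 1 + (g.length + 1) = j + (g.length + 1 + 1) := by omega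
      rw [e2, e1] at hi
      exact hi
    · have hyes : tt ≤ c.2 - b.2 := by omega
      simp only [grp, hg, if_neg hc, brkAux, hyes, if_pos, List.singleton_append, endsN,
        List.length_cons, List.length_nil, Nat.zero_add] at hi ⊢
      have e2 : j + 1 + 1 + rest.length = j + 1 + (rest.length + 1) := by omega
      rw [e2] at hi
      rw [List.cons_append, hi]

-- B computes grp on the sorted list
lemma altB_eq_grp (tt : Int) (boxes : List (Int × Int)) (b : Int × Int) (t : List (Int × Int))
    (hs : PySem.List.sorted2 boxes (fun x => x.2) (fun x => x.1) = b :: t) :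
    group_boxes_by_line_alt boxes tt = grp tt b t := by
  unfold group_boxes_by_line_alt
  rw [hs]
  simp only []
  have hbr := filter_range_eq_brkAux tt t ([] : List (Int × Int)) b
  have e : ([] : List (Int × Int)) ++ b :: t = b :: t := List.nil_append _
  rw [e] at hbr
  simp only [List.length_nil, Nat.cast_zero, zero_add] at hbr
  rw [hbr]
  have hend := brkAux_ends tt t b 0
  simp only [zero_add] at hend
  have hlen : ((b :: t).length : Int) = ((1 + t.length : Nat) : Int) := by
    simp [Nat.add_comm]
  have hbounds : (0 : Int) :: ((brkAux tt 1 b t).map (fun k : Nat => (k : Int)) ++ [((b :: t).length : Int)])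
      = ((0 : Nat) :: endsN 0 (grp tt b t)).map (fun k : Nat => (k : Int)) := by
    rw [hlen, List.map_cons, ← hend, List.map_append]
    simp
  rw [hbounds]
  have hmr := mapRange_pairs (((0 : Nat) :: endsN 0 (grp tt b t)).map (fun k : Nat => (k : Int)))
      (fun x y => PySem.List.slice (b :: t) (some x) (some y))
  rw [hmr]
  have htl : (((0 : Nat) :: endsN 0 (grp tt b t)).map (fun k : Nat => (k : Int))).tail
      = (endsN 0 (grp tt b t)).map (fun k : Nat => (k : Int)) := by simp
  rw [htl, List.zip_map, zip_ends_eq_cutPairs, List.map_map]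
  have hchop := chop_cutPairs (grp tt b t) ([] : List (Int × Int))
  simp only [List.nil_append, List.length_nil, grp_flatten] at hchop
  simpa using hchop

-- both ports compute grp on the sorted list
lemma both_eq_grp (boxes : List (Int × Int)) (tt : Int) (h : boxes ≠ []) :
    group_boxes_by_line boxes tt = group_boxes_by_line_alt boxes tt := by
  have hperm := PySem.List.sorted2_perm (xs := boxes) (k1 := fun x : Int × Int => x.2) (k2 := fun x : Int × Int => x.1) (rev := false)
  cases hsn : PySem.List.sorted2 boxes (fun x => x.2) (fun x => x.1) with
  | nil =>
    rw [hsn] at hperm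
    exact absurd hperm.symm.eq_nil h
  | cons b t =>
    rw [altB_eq_grp tt boxes b t hsn]
    unfold group_boxes_by_line
    rw [hsn]
    simp only [PySem.List.pyGet?_zero_cons, PySem.List.slice_from_one, List.tail_cons]
    have hA := foldA_eq_grp tt t [] [] b
    simp only [List.nil_append] at hA
    rw [hA, mapHead_id]

-- ===== VERDICT (by name: the statement is the Claim_ definition above) =====
theorem group_boxes_by_line_spec : Claim_equal_group_boxes_by_line := by
  intro boxes tt _ hpre
  unfold Spec_group_boxes_by_line
  exact both_eq_grp boxes tt hpre
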